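-- pv_equiv track=rewrite | github.com/mutl3y/prism-learn | scripts/learning_alias_helper.py | _render_section_aliases_yaml
-- ===== SOURCE A (Python) =====
-- def _render_section_aliases_yaml(
--     header_lines: list[str], alias_map: dict[str, str]
-- ) -> str:
--     """Render grouped section_aliases YAML with deterministic ordering."""
--     by_section: dict[str, list[str]] = {}
--     for title, section_id in alias_map.items():
--         by_section.setdefault(section_id, []).append(title)
--
--     out_lines: list[str] = list(header_lines)
--     if out_lines and out_lines[-1].strip() != "":
--         out_lines.append("")
--
--     for section_id in sorted(by_section):
--         out_lines.append(f"  # -- {section_id} {'-' * 60}")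
--         for title in sorted(by_section[section_id]):
--             safe_title = title.replace('"', '\\"')
--             out_lines.append(f'  "{safe_title}": {section_id}')
--         out_lines.append("")
--
--     while out_lines and out_lines[-1] == "":
--         out_lines.pop()
--
--     return "\n".join(out_lines) + "\n"
-- ===== SOURCE B (Python) =====
-- def _render_section_aliases_yaml(
--     header_lines: list[str], alias_map: dict[str, str]
-- ) -> str:
--     """Render grouped section_aliases YAML: one flat sort, one grouping pass."""
--     out_lines: list[str] = list(header_lines)
--     if out_lines and out_lines[-1].strip() != "":
--         out_lines.append("")
--
--     pairs = sorted((section_id, title) for title, section_id in alias_map.items())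
--     current = None
--     for section_id, title in pairs:
--         if section_id != current:
--             if current is not None:
--                 out_lines.append("")
--             out_lines.append(f"  # -- {section_id} {'-' * 60}")
--             current = section_id
--         safe_title = title.replace('"', '\\"')
--         out_lines.append(f'  "{safe_title}": {section_id}')
--     if current is not None:
--         out_lines.append("")
--
--     while out_lines and out_lines[-1] == "":
--         out_lines.pop()
--
--     return "\n".join(out_lines) + "\n"
-- ===== Notes on version B (the rewrite author's own statement) =====
-- stated objective: alternative
-- what changed: A builds a dict of per-section title lists and then runs nested loops with a separate sorted() per section; B instead builds the flat list of (section_id, title) pairs, sorts it once by the full tuple, and emits the grouped output in a single pass with a 'current section' accumulator.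
import Mathlib
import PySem

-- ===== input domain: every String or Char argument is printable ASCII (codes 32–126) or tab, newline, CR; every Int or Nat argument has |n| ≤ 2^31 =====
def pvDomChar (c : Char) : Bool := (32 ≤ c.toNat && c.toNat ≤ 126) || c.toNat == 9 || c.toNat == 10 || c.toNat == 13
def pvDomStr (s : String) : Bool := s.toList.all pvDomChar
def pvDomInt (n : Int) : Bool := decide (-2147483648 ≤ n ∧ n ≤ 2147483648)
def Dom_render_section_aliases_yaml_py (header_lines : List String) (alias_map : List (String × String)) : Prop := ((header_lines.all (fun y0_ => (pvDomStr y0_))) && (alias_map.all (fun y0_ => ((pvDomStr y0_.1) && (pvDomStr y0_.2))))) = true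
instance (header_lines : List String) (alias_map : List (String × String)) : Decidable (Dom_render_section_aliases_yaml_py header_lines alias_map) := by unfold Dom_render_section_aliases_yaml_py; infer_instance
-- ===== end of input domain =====

-- B replaces A's dict-of-lists grouping plus nested per-group sorts by ONE flat sort of
-- (section_id, title) pairs and a single grouping pass with a 'current section' accumulator
-- (objective: alternative decomposition, same exact output).

-- ===== PORT A =====
-- shared literal pieces of both Pythons: the two f-strings, the header handling and the
-- trailing-blank pop (identical source text in A and B)
def pvDashes : String := "------------------------------------------------------------"

def pvCommentLine (section_id : String) : String :=
  "  # -- " ++ section_id ++ " " ++ pvDashes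

def pvAliasLine (title section_id : String) : String :=
  "  \"" ++ PySem.Str.replace title "\"" "\\\"" ++ "\": " ++ section_id

def pvHeaderPrep (header_lines : List String) : List String :=
  if header_lines ≠ [] ∧ PySem.Str.strip (header_lines.getLastD "") ≠ "" then
    header_lines ++ [""]
  else header_lines

def pvPopTrailingBlank (l : List String) : List String :=
  if h : l ≠ [] ∧ l.getLastD "" = "" then pvPopTrailingBlank l.dropLast else l
termination_by l.length
decreasing_by
  have hne : l ≠ [] := h.1
  have : 0 < l.length := List.length_pos_iff.mpr hne
  simp [List.length_dropLast]; omega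

def render_section_aliases_yaml_py (header_lines : List String) (alias_map : List (String × String)) : String :=
  let by_section : PySem.Dict String (List String) :=
    (PySem.Dict.ofList alias_map).items.foldl
      (fun d p => d.modify p.2 [] (fun ts => ts ++ [p.1])) PySem.Dict.empty
  let out1 := pvHeaderPrep header_lines
  let out2 := (PySem.List.sorted by_section.keys (fun k => k)).foldl
      (fun acc section_id =>
        ((PySem.List.sorted (by_section.getD section_id []) (fun t => t)).foldl
            (fun acc title => acc ++ [pvAliasLine title section_id])
            (acc ++ [pvCommentLine section_id])) ++ [""])
      out1
  PySem.Str.join "\n" (pvPopTrailingBlank out2) ++ "\n"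

-- ===== PORT B =====
-- the body of B's single for-loop ('if section_id != current: … ; append alias line')
def pvStepB (st : List String × Option String) (p : String × String) : List String × Option String :=
  let st1 :=
    if some p.1 ≠ st.2 then
      ((if st.2 ≠ none then st.1 ++ [""] else st.1) ++ [pvCommentLine p.1], some p.1)
    else st
  (st1.1 ++ [pvAliasLine p.2 p.1], st1.2)

def render_section_aliases_yaml_py_alt (header_lines : List String) (alias_map : List (String × String)) : String :=
  let out1 := pvHeaderPrep header_lines
  let pairs := PySem.List.sorted2
      ((PySem.Dict.ofList alias_map).items.map (fun p => (p.2, p.1)))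
      (fun p => p.1) (fun p => p.2)
  let st := pairs.foldl pvStepB (out1, none)
  let out2 := if st.2 ≠ none then st.1 ++ [""] else st.1
  PySem.Str.join "\n" (pvPopTrailingBlank out2) ++ "\n"

-- ===== PRECONDITION & SPEC =====
def Spec_render_section_aliases_yaml_py (header_lines : List String) (alias_map : List (String × String)) (out : String) : Prop := out = render_section_aliases_yaml_py_alt header_lines alias_map
instance (header_lines : List String) (alias_map : List (String × String)) (out : String) : Decidable (Spec_render_section_aliases_yaml_py header_lines alias_map out) := by unfold Spec_render_section_aliases_yaml_py; infer_instance

-- ===== CLAIM (what is proved, stated in full; the proofs are below) =====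
def Claim_equal_render_section_aliases_yaml_py : Prop := ∀ (header_lines : List String) (alias_map : List (String × String)), Dom_render_section_aliases_yaml_py header_lines alias_map → Spec_render_section_aliases_yaml_py header_lines alias_map (render_section_aliases_yaml_py header_lines alias_map)

-- ===== LEMMAS AND PROOFS =====

-- B's single sort by the tuple (section_id, title) is the sort by the lexicographic key
theorem pv_sorted2_eq_sorted_lex (xs : List (String × String)) :
    PySem.List.sorted2 xs (fun p => p.1) (fun p => p.2) =
      PySem.List.sorted xs (fun p => toLex p) := by
  unfold PySem.List.sorted2 PySem.List.sorted
  simp only [if_neg (by decide : ¬ (false = true))]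
  congr 1
  funext acc x
  congr 1
  funext a b
  rcases lt_trichotomy a.1 b.1 with h | h | h
  · simp only [Prod.Lex.toLex_lt_toLex, decide_eq_true h,
      decide_eq_true (show a.1 < b.1 ∨ a.1 = b.1 ∧ a.2 < b.2 from Or.inl h), Bool.true_or]
  · have h0 : ¬ a.1 < b.1 := h ▸ lt_irrefl _
    have h0' : ¬ b.1 < a.1 := h ▸ lt_irrefl _
    have hiff : (a.1 < b.1 ∨ a.1 = b.1 ∧ a.2 < b.2) ↔ a.2 < b.2 := by
      constructor
      · rintro (hc | ⟨-, hc⟩)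
        · exact absurd hc h0
        · exact hc
      · intro hc
        exact Or.inr ⟨h, hc⟩
    rw [show decide (toLex a < toLex b) = decide (a.2 < b.2) from
      decide_eq_decide.mpr (Prod.Lex.toLex_lt_toLex.trans hiff)]
    simp only [decide_eq_false h0, decide_eq_false h0', Bool.not_false, Bool.true_and,
      Bool.false_or]
  · have h1 : ¬ (a.1 < b.1 ∨ a.1 = b.1 ∧ a.2 < b.2) := by
      rintro (hc | ⟨hc, -⟩)
      · exact asymm h hc
      · exact ne_of_gt h hc
    rw [show decide (toLex a < toLex b) = false from
      decide_eq_false (fun hc => h1 (Prod.Lex.toLex_lt_toLex.mp hc))]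
    simp only [decide_eq_false (asymm h : ¬ a.1 < b.1), decide_eq_true h, Bool.not_true,
      Bool.false_and, Bool.false_or]

theorem pv_count_flatMap_filter (P : List (String × String)) (sections : List String)
    (z : String × String) (hnd : sections.Nodup) :
    (sections.flatMap (fun s => P.filter (fun q => q.1 == s))).count z
      = if z.1 ∈ sections then P.count z else 0 := by
  induction sections with
  | nil => simp
  | cons s rest ih =>
    simp only [List.flatMap_cons, List.count_append, List.nodup_cons] at *
    by_cases hz : z.1 = s
    · rw [List.count_filter (by simp [hz])]
      have hzr : z.1 ∉ rest := hz ▸ hnd.1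
      rw [ih hnd.2, hz] at *
      simp [hz ▸ hzr]
    · have h0 : (P.filter (fun q => q.1 == s)).count z = 0 := by
        rw [List.count_eq_zero]
        intro hm
        exact hz (by simpa using (List.of_mem_filter hm))
      rw [h0, ih hnd.2]
      simp [List.mem_cons, hz]

theorem pv_partition_perm (P : List (String × String)) (sections : List String)
    (hnd : sections.Nodup) (hall : ∀ p ∈ P, p.1 ∈ sections) :
    (sections.flatMap (fun s => P.filter (fun q => q.1 == s))).Perm P := by
  rw [List.perm_iff_count]
  intro z
  rw [pv_count_flatMap_filter P sections z hnd]
  by_cases hz : z.1 ∈ sections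
  · simp [hz]
  · simp only [hz, if_false]
    symm
    rw [List.count_eq_zero]
    intro hm
    exact hz (hall z hm)

theorem pv_flatMap_perm {α β : Type} (l : List α) (f g : α → List β)
    (h : ∀ a ∈ l, (f a).Perm (g a)) :
    (l.flatMap f).Perm (l.flatMap g) := by
  induction l with
  | nil => simp
  | cons a t ih =>
    simp only [List.flatMap_cons]
    exact (h a (by simp)).append (ih fun x hx => h x (by simp [hx]))

theorem pv_filter_eq_map_snd (P : List (String × String)) (s : String) :
    P.filter (fun q => q.1 == s)
      = ((P.filter (fun q => q.1 == s)).map (fun q => q.2)).map (fun t => (s, t)) := by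
  rw [List.map_map]
  conv_lhs => rw [← List.map_id (P.filter (fun q => q.1 == s))]
  apply List.map_congr_left
  intro q hq
  have : q.1 = s := by simpa using List.of_mem_filter hq
  simp [Function.comp, ← this]

-- group titles are distinct (they are dict keys)
theorem pv_titles_nodup (P : List (String × String)) (hT : (P.map (fun q => q.2)).Nodup)
    (s : String) : ((P.filter (fun q => q.1 == s)).map (fun q => q.2)).Nodup :=
  hT.sublist ((P.filter_sublist).map (fun q => q.2))

theorem pv_pairwise_lt_of_nodup (l : List String) (h1 : l.Pairwise (fun a b => a ≤ b))
    (h2 : l.Nodup) : l.Pairwise (fun a b => a < b) := by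
  have := List.Pairwise.and h1 h2
  exact this.imp (fun {a b} hab => lt_of_le_of_ne hab.1 hab.2)

-- the grouped-sorted list B sorts to, named: sections in increasing order, titles sorted inside
theorem pv_sorted2_eq_flatMap (P : List (String × String))
    (hT : (P.map (fun q => q.2)).Nodup) :
    PySem.List.sorted2 P (fun p => p.1) (fun p => p.2)
      = (PySem.List.sorted (PySem.Set.ofList (P.map (fun q => q.1))) (fun k => k)).flatMap
          (fun s => (PySem.List.sorted ((P.filter (fun q => q.1 == s)).map (fun q => q.2)) (fun t => t)).map
            (fun t => (s, t))) := by
  rw [pv_sorted2_eq_sorted_lex]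
  apply PySem.List.sorted_eq_of_perm_of_pairwise_lt
  · -- permutation
    have h1 : ((PySem.List.sorted (PySem.Set.ofList (P.map (fun q => q.1))) (fun k => k)).flatMap
          (fun s => (PySem.List.sorted ((P.filter (fun q => q.1 == s)).map (fun q => q.2)) (fun t => t)).map
            (fun t => (s, t)))).Perm
        ((PySem.List.sorted (PySem.Set.ofList (P.map (fun q => q.1))) (fun k => k)).flatMap
          (fun s => P.filter (fun q => q.1 == s))) := by
      apply pv_flatMap_perm
      intro s _
      calc ((PySem.List.sorted ((P.filter (fun q => q.1 == s)).map (fun q => q.2)) (fun t => t)).map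
              (fun t => (s, t))).Perm
            (((P.filter (fun q => q.1 == s)).map (fun q => q.2)).map (fun t => (s, t))) :=
              (PySem.List.sorted_perm _ _ _).map _
        _ = P.filter (fun q => q.1 == s) := (pv_filter_eq_map_snd P s).symm
    refine h1.trans (pv_partition_perm P _ ?_ ?_)
    · exact ((PySem.List.sorted_perm _ _ _).nodup_iff).mpr (PySem.Set.nodup_ofList _)
    · intro p hp
      rw [PySem.List.mem_sorted, PySem.Set.mem_ofList]
      exact List.mem_map_of_mem hp
  · -- pairwise strictly increasing lexicographic key
    rw [List.flatMap_def, List.pairwise_flatten]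
    constructor
    · intro l' hl'
      obtain ⟨s, _, rfl⟩ := List.mem_map.mp hl'
      rw [List.pairwise_map]
      have hnd : (PySem.List.sorted ((P.filter (fun q => q.1 == s)).map (fun q => q.2)) (fun t => t)).Nodup :=
        ((PySem.List.sorted_perm _ _ _).nodup_iff).mpr (pv_titles_nodup P hT s)
      have hle := PySem.List.sorted_pairwise ((P.filter (fun q => q.1 == s)).map (fun q => q.2)) (fun t => t)
      refine List.Pairwise.imp ?_ (pv_pairwise_lt_of_nodup _ hle hnd)
      intro a b h
      exact Prod.Lex.toLex_lt_toLex.mpr (Or.inr ⟨rfl, h⟩)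
    · rw [List.pairwise_map]
      have hsec := PySem.List.sorted_ofList_pairwise_lt (P.map (fun q => q.1))
      refine hsec.imp (fun {s1 s2} h => ?_)
      intro x hx y hy
      obtain ⟨t1, _, rfl⟩ := List.mem_map.mp hx
      obtain ⟨t2, _, rfl⟩ := List.mem_map.mp hy
      exact Prod.Lex.toLex_lt_toLex.mpr (Or.inl h)

-- A's outer loop, as a flatMap
theorem pv_foldA (sections : List String) (T : String → List String) (out : List String) :
    sections.foldl
        (fun acc s => ((T s).foldl (fun acc t => acc ++ [pvAliasLine t s])
            (acc ++ [pvCommentLine s])) ++ [""]) out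
      = out ++ sections.flatMap (fun s => pvCommentLine s :: ((T s).map (fun t => pvAliasLine t s) ++ [""])) := by
  induction sections generalizing out with
  | nil => simp
  | cons s rest _ih =>
    simp only [List.foldl_cons, List.flatMap_cons, PySem.List.foldl_append_singleton_eq_map]
    simp [List.append_assoc, List.flatMap_def]

theorem pv_foldB_inner (ts : List String) (s : String) (out : List String) :
    (ts.map (fun t => (s, t))).foldl pvStepB (out, some s)
      = (out ++ ts.map (fun t => pvAliasLine t s), some s) := by
  induction ts generalizing out with
  | nil => simp
  | cons t ts ih =>
    simp only [List.map_cons, List.foldl_cons]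
    have hstep : pvStepB (out, some s) (s, t) = (out ++ [pvAliasLine t s], some s) := by
      simp [pvStepB]
    rw [hstep, ih]
    simp

theorem pv_foldB (sections : List String) (T : String → List String) :
    ∀ (out : List String) (cur : Option String),
      sections.Pairwise (fun a b => a ≠ b) → (∀ s ∈ sections, cur ≠ some s) →
      (∀ s ∈ sections, T s ≠ []) →
      (let r := (sections.flatMap (fun s => (T s).map (fun t => (s, t)))).foldl pvStepB (out, cur)
       if r.2 ≠ none then r.1 ++ [""] else r.1)
        = (if cur ≠ none then out ++ [""] else out)
          ++ sections.flatMap (fun s => pvCommentLine s :: ((T s).map (fun t => pvAliasLine t s) ++ [""])) := by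
  induction sections with
  | nil => intro out cur _ _ _; simp
  | cons s rest ih =>
    intro out cur hpw hcur hne
    obtain ⟨t0, ts, hts⟩ : ∃ t0 ts, T s = t0 :: ts := by
      cases h : T s with
      | nil => exact absurd h (hne s (by simp))
      | cons a b => exact ⟨a, b, rfl⟩
    simp only [List.flatMap_cons, List.foldl_append, hts, List.map_cons, List.foldl_cons]
    have hstep : pvStepB (out, cur) (s, t0)
        = (((if cur ≠ none then out ++ [""] else out) ++ [pvCommentLine s]) ++ [pvAliasLine t0 s], some s) := by
      have hne' : some s ≠ cur := Ne.symm (hcur s (by simp))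
      simp [pvStepB, hne']
    rw [hstep, pv_foldB_inner]
    have hcur' : ∀ s' ∈ rest, (some s : Option String) ≠ some s' := fun s' hs' h =>
      (List.pairwise_cons.mp hpw).1 s' hs' (Option.some_injective _ h)
    have := ih ((((if cur ≠ none then out ++ [""] else out) ++ [pvCommentLine s]) ++ [pvAliasLine t0 s]) ++ ts.map (fun t => pvAliasLine t s))
      (some s) (List.pairwise_cons.mp hpw).2 hcur' (fun s' hs' => hne s' (by simp [hs']))
    simp only [] at this ⊢
    rw [this]
    simp [List.append_assoc]

-- ===== VERDICT (by name: the statement is the Claim_ definition above) =====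
theorem pv_main (header_lines : List String) (alias_map : List (String × String)) :
    render_section_aliases_yaml_py header_lines alias_map
      = render_section_aliases_yaml_py_alt header_lines alias_map := by
  unfold render_section_aliases_yaml_py render_section_aliases_yaml_py_alt
  dsimp only
  set items := (PySem.Dict.ofList alias_map).items with hitems
  set P : List (String × String) := items.map (fun p => (p.2, p.1)) with hP
  have hPQ : P.map (fun q => q.1) = items.map (fun p => p.2) := by
    simp [hP, List.map_map]
  have hT : (P.map (fun q => q.2)).Nodup := by
    have h1 : P.map (fun q => q.2) = items.map (fun p => p.1) := by
      simp [hP, List.map_map]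
    rw [h1]
    have h2 := PySem.Dict.nodup_keys_ofList alias_map
    simpa [PySem.Dict.keys, ← hitems] using h2
  have hfold : items.foldl (fun d p => d.modify p.2 [] (fun ts => ts ++ [p.1])) PySem.Dict.empty
      = P.foldl (fun d q => d.modify q.1 [] (fun ts => ts ++ [q.2])) PySem.Dict.empty := by
    rw [hP, List.foldl_map]
  have hkeys : (items.foldl (fun d p => d.modify p.2 [] (fun ts => ts ++ [p.1])) PySem.Dict.empty).keys
      = PySem.Set.ofList (P.map (fun q => q.1)) := by
    have h := PySem.Dict.keys_foldl_modify_key items (fun p => p.2) ([] : List String)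
      (fun d p ts => ts ++ [p.1]) PySem.Dict.empty
    rw [PySem.Dict.keys_empty] at h
    rw [hPQ, PySem.Set.ofList_eq_foldl]
    exact h
  have hgetD : ∀ s, (items.foldl (fun d p => d.modify p.2 [] (fun ts => ts ++ [p.1])) PySem.Dict.empty).getD s []
      = (P.filter (fun q => q.1 == s)).map (fun q => q.2) := by
    intro s
    rw [hfold]
    have h := PySem.Dict.getD_foldl_modify_append P PySem.Dict.empty s
    simpa [PySem.Dict.getD_empty] using h
  -- the common grouped line list
  set T : String → List String :=
    fun s => PySem.List.sorted ((P.filter (fun q => q.1 == s)).map (fun q => q.2)) (fun t => t) with hTdef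
  set sections : List String :=
    PySem.List.sorted (PySem.Set.ofList (P.map (fun q => q.1))) (fun k => k) with hsec
  have hsnd : sections.Nodup :=
    ((PySem.List.sorted_perm _ _ _).nodup_iff).mpr (PySem.Set.nodup_ofList _)
  have hA : (PySem.List.sorted (items.foldl (fun d p => d.modify p.2 [] (fun ts => ts ++ [p.1])) PySem.Dict.empty).keys (fun k => k)).foldl
      (fun acc section_id =>
        ((PySem.List.sorted ((items.foldl (fun d p => d.modify p.2 [] (fun ts => ts ++ [p.1])) PySem.Dict.empty).getD section_id []) (fun t => t)).foldl
            (fun acc title => acc ++ [pvAliasLine title section_id])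
            (acc ++ [pvCommentLine section_id])) ++ [""])
      (pvHeaderPrep header_lines)
      = pvHeaderPrep header_lines
        ++ sections.flatMap (fun s => pvCommentLine s :: ((T s).map (fun t => pvAliasLine t s) ++ [""])) := by
    rw [hkeys]
    have hstepEq : (fun (acc : List String) (section_id : String) =>
        ((PySem.List.sorted ((items.foldl (fun d p => d.modify p.2 [] (fun ts => ts ++ [p.1])) PySem.Dict.empty).getD section_id []) (fun t => t)).foldl
            (fun acc title => acc ++ [pvAliasLine title section_id])
            (acc ++ [pvCommentLine section_id])) ++ [""])
      = (fun (acc : List String) (s : String) =>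
        ((T s).foldl (fun acc t => acc ++ [pvAliasLine t s]) (acc ++ [pvCommentLine s])) ++ [""]) := by
      funext acc s
      rw [hgetD s, hTdef]
    rw [hstepEq, ← hsec]
    exact pv_foldA sections T (pvHeaderPrep header_lines)
  have hGB : PySem.List.sorted2 P (fun p => p.1) (fun p => p.2)
      = sections.flatMap (fun s => (T s).map (fun t => (s, t))) := by
    rw [pv_sorted2_eq_flatMap P hT, hsec, hTdef]
  have hBne : ∀ s ∈ sections, T s ≠ [] := by
    intro s hs
    rw [hsec, PySem.List.mem_sorted, PySem.Set.mem_ofList, List.mem_map] at hs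
    obtain ⟨q, hq, rfl⟩ := hs
    rw [hTdef]
    rw [Ne, PySem.List.sorted_eq_nil_iff, List.map_eq_nil_iff]
    intro hfil
    have hmem : q ∈ P.filter (fun q' => q'.1 == q.1) := List.mem_filter.mpr ⟨hq, by simp⟩
    rw [hfil] at hmem
    exact List.not_mem_nil hmem
  have hB := pv_foldB sections T (pvHeaderPrep header_lines) none hsnd
    (fun s _ => by simp) hBne
  simp only [ne_eq, not_true_eq_false, if_false] at hB
  rw [hA, hGB]
  rw [hB]

theorem render_section_aliases_yaml_py_spec : Claim_equal_render_section_aliases_yaml_py := by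
  intro header_lines alias_map _
  unfold Spec_render_section_aliases_yaml_py
  exact pv_main header_lines alias_map
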